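-- pv_equiv track=rewrite | github.com/ybharatu/Third_Eye_Not_Blind | lane_cv.py | findLongestLineIdx
-- ===== SOURCE A (Python) =====
-- def findLongestLineIdx(linelist):
--     maxlen = 0
--     bestlnidx = None
--     for i, lnlen in enumerate(linelist):
--         if lnlen > maxlen:
--             maxlen = lnlen
--             bestlnidx = i
--     return bestlnidx
-- ===== SOURCE B (Python) =====
-- def findLongestLineIdx(linelist):
--     if not linelist:
--         return None
--     m = max(linelist)
--     if m <= 0:
--         return None
--     return linelist.index(m)
-- ===== Notes on version B (the rewrite author's own statement) =====
-- stated objective: idiomatic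
-- what changed: Replaces A's single streaming argmax loop (running maxlen/bestlnidx over enumerate) by a two-pass find-then-locate: max(linelist) followed by linelist.index(m), returning None for empty input or non-positive maximum.
import Mathlib
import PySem

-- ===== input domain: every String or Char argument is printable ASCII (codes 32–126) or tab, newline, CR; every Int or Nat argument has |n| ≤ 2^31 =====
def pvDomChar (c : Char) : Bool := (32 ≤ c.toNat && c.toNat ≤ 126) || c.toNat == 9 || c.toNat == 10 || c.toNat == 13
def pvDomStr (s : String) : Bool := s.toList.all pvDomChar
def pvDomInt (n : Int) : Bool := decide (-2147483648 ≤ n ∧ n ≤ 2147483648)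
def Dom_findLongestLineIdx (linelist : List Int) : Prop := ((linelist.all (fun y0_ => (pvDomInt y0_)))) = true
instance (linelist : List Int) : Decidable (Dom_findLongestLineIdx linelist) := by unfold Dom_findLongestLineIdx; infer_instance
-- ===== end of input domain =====

-- B replaces A's single streaming argmax loop by a two-pass max-then-first-index lookup (idiomatic, same cost).

-- ===== PORT A =====
-- A's loop: running (maxlen, bestlnidx) over enumerate(linelist), strict '>' update.
def findLongestLineIdx (linelist : List Int) : Option Int :=
  ((PySem.List.enumerate linelist 0).foldl
    (fun (s : Int × Option Int) (p : Int × Int) =>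
      if p.2 > s.1 then (p.2, some p.1) else s)
    ((0 : Int), (none : Option Int))).2

-- ===== PORT B =====
-- B: guard empty list, m = max(linelist), None if m <= 0, else linelist.index(m).
def findLongestLineIdx_alt (linelist : List Int) : Option Int :=
  match PySem.List.max? linelist (fun x => x) with
  | none => none
  | some m => if m ≤ 0 then none
      else (PySem.List.index? linelist m).map (fun k => (k : Int))

-- ===== PRECONDITION & SPEC =====
def Spec_findLongestLineIdx (linelist : List Int) (out : Option Int) : Prop := out = findLongestLineIdx_alt linelist
instance (linelist : List Int) (out : Option Int) : Decidable (Spec_findLongestLineIdx linelist out) := by unfold Spec_findLongestLineIdx; infer_instance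

-- ===== CLAIM (what is proved, stated in full; the proofs are below) =====
def Claim_equal_findLongestLineIdx : Prop := ∀ (linelist : List Int), Dom_findLongestLineIdx linelist → Spec_findLongestLineIdx linelist (findLongestLineIdx linelist)

-- ===== LEMMAS AND PROOFS =====

theorem pv_foldl_max_max (l : List Int) (a b : Int) :
    l.foldl max (max a b) = max a (l.foldl max b) := by
  induction l generalizing b with
  | nil => rfl
  | cons c l ih =>
      simp only [List.foldl_cons, max_assoc, ih]

-- The loop invariant for A's fold, stated on a nonempty list in cons form.
theorem pv_foldA_spec (t : List Int) : ∀ (x k m : Int) (b : Option Int),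
    (PySem.List.enumerate (x :: t) k).foldl
      (fun (s : Int × Option Int) (p : Int × Int) =>
        if p.2 > s.1 then (p.2, some p.1) else s) (m, b)
    = (if t.foldl max x ≤ m then (m, b)
       else (t.foldl max x,
             (PySem.List.index? (x :: t) (t.foldl max x)).map (fun j => k + (j : Int)))) := by
  induction t with
  | nil =>
      intro x k m b
      simp only [PySem.List.enumerate_cons, PySem.List.enumerate_nil, List.foldl_cons,
        List.foldl_nil, PySem.List.index?_cons_self]
      by_cases h : x ≤ m
      · rw [if_neg (by omega), if_pos h]
      · rw [if_pos (by omega), if_neg h]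
        simp
  | cons y t ih =>
      intro x k m b
      rw [PySem.List.enumerate_cons, List.foldl_cons]
      show (PySem.List.enumerate (y :: t) (k + 1)).foldl _ (if x > m then (x, some k) else (m, b)) = _
      have hM : (y :: t).foldl max x = max x (t.foldl max y) := by
        rw [List.foldl_cons, pv_foldl_max_max]
      by_cases hxm : x > m
      · rw [if_pos hxm, ih y (k + 1) x (some k)]
        by_cases h1 : t.foldl max y ≤ x
        · -- overall max is x, at index k (= first position)
          have : ¬ (y :: t).foldl max x ≤ m := by
            rw [hM]; simp only [max_le_iff]; omega
          rw [if_pos h1, if_neg this]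
          have hMx : (y :: t).foldl max x = x := by rw [hM]; exact max_eq_left h1
          rw [hMx, PySem.List.index?_cons_self]
          simp
      -- max lies in the tail and exceeds x
        · have hMx : (y :: t).foldl max x = t.foldl max y := by
            rw [hM]; exact max_eq_right (by omega)
          have : ¬ (y :: t).foldl max x ≤ m := by rw [hMx]; omega
          rw [if_neg h1, if_neg this, hMx,
            PySem.List.index?_cons_of_ne _ (by omega : x ≠ t.foldl max y)]
          cases PySem.List.index? (y :: t) (t.foldl max y) with
          | none => simp
          | some j => simp; ring
      · rw [if_neg hxm, ih y (k + 1) m b]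
        have hxm' : x ≤ m := by omega
        by_cases h1 : t.foldl max y ≤ m
        · have : (y :: t).foldl max x ≤ m := by rw [hM]; exact max_le hxm' h1
          rw [if_pos h1, if_pos this]
        · have hMx : (y :: t).foldl max x = t.foldl max y := by
            rw [hM]; exact max_eq_right (by omega)
          have : ¬ (y :: t).foldl max x ≤ m := by rw [hMx]; omega
          rw [if_neg h1, if_neg this, hMx,
            PySem.List.index?_cons_of_ne _ (by omega : x ≠ t.foldl max y)]
          cases PySem.List.index? (y :: t) (t.foldl max y) with
          | none => simp
          | some j => simp; ring

-- ===== VERDICT (by name: the statement is the Claim_ definition above) =====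
theorem findLongestLineIdx_spec : Claim_equal_findLongestLineIdx := by
  intro linelist _
  unfold Spec_findLongestLineIdx findLongestLineIdx findLongestLineIdx_alt
  cases linelist with
  | nil => rfl
  | cons x t =>
      rw [pv_foldA_spec t x 0 0 none, PySem.List.max?_id_cons]
      by_cases h : t.foldl max x ≤ 0
      · rw [if_pos h]; simp [h]
      · rw [if_neg h]
        simp only [if_neg h]
        congr 1
        funext j
        simp
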